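-- pv_equiv track=rewrite | github.com/akhilkumar2004/CSC-520-Assignment-2 | og.py | player_move
-- ===== SOURCE A (Python) =====
-- EMPTY_SQUARE = "."
--
-- N = 4
--
-- def orth_neighbors(r, c):
--     """
--     Inputs: The row (r) and column (c) of a square on the board.
--     Output: A list of all orthogonal neigbors (up, down, left, right).
--
--     Example (on a 4x4 board):
--     orth_neighbors(0, 0) -> [(0, 1), (1, 0)]
--     orth_neighbors(1, 1) -> [(0, 1), (1, 0), (1, 2), (2, 1)]
--
--
--     """
--     orth_result = []
--     if r > 0:
--         orth_result.append((r-1, c)) # Up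
--     if r < N-1:
--         orth_result.append((r+1, c)) # Down
--     if c > 0:
--         orth_result.append((r, c-1)) # Left
--     if c < N-1:
--         orth_result.append((r, c+1)) # Right
--     return orth_result
--
-- def compute_control(board):
--     """
--     Input: The current 4x4 board
--     Output: The control for the player
--
--     Rules for controlling:
--
--     1. A square is controlled if there is already a marble on that square.
--     2. An empty square is controlled by a player if all of its orthogonal neighbors are controlled by the same player.
--     3. This process would be repeated until no new squares can be claimed.
--     """
--     # Copies the board into 'control' (so the original board is not modified directly)
--     control  = [[board[r][c] for c in range(N)] for r in range(N)]
--
--     status = True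
--
--     # Repeat until no futher chages are possible
--     while status:
--         status = False
--         for r in range(N):
--             for c in range(N):
--                 # Get valyes of orthogonal neighbors
--                 if control[r][c] == EMPTY_SQUARE:
--                     # If all non-empty neighbors are the same value, fill the square
--                     neighbor_vals = [control[rr][cc] for rr, cc in orth_neighbors(r, c)]
--                     if neighbor_vals and all(val == neighbor_vals[0] and val != EMPTY_SQUARE for val in neighbor_vals):
--                         control[r][c] = neighbor_vals[0]
--                         status = True # A change was made so continue looping
--
--     # Return the updated board with updated values
--     return control
--
-- def player_move(board, player, r, c):
--     """
--     Inputs: The current 4x4 board, B or W player, row and column of index of the move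
--     Output: The new board configuration after the player move and all autofills have been applied
--
--     Steps:
--
--     1. Player places a marble on a chosen square.
--     2. Recompute the control of the board.
--     3. If this causes any empty squares to become controlled by the same player, automatically fill the squares with the player's marble.
--     4. Repeat the auto-fill process until no new squares have been filled.
--     5. Return the updated board configuration.
--
--     """
--     # Convert the board rows into lists for mutation
--     board = [list(row) for row in board]
--
--     # Place the player's marble
--     board[r][c] = player
--
--     # Compute the initial control map for the board
--     control = compute_control(board)
--     board_filled = True
--
--     # Repeat until no more squares can be filled
--     while board_filled:
--         board_filled = False
--         for rr in range(N):
--             for cc in range(N):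
--                 # If a square is emptu but marked as controlled by player
--                 if board[rr][cc] == EMPTY_SQUARE and control[rr][cc] == player:
--                     # Fill that square with player's piece
--                     board[rr][cc] = player
--                     board_filled = True
--
--         # Recompute the control map
--         control = compute_control(board)
--
--     # Return the updated board configuration
--     return board
-- ===== SOURCE B (Python) =====
-- EMPTY_SQUARE = "."
--
-- N = 4
--
-- def orth_neighbors(r, c):
--     orth_result = []
--     if r > 0:
--         orth_result.append((r-1, c))
--     if r < N-1:
--         orth_result.append((r+1, c))
--     if c > 0:
--         orth_result.append((r, c-1))
--     if c < N-1:
--         orth_result.append((r, c+1))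
--     return orth_result
--
-- def player_move(board, player, r, c):
--     # Single-player flood fill: no two-player control table is ever built.
--     board = [list(row) for row in board]
--     board[r][c] = player
--     if player != EMPTY_SQUARE:
--         changed = True
--         while changed:
--             changed = False
--             for rr in range(N):
--                 for cc in range(N):
--                     if board[rr][cc] == EMPTY_SQUARE and all(
--                         board[a][b] == player for a, b in orth_neighbors(rr, cc)
--                     ):
--                         board[rr][cc] = player
--                         changed = True
--     return board
-- ===== Notes on version B (the rewrite author's own statement) =====
-- stated objective: simpler
-- what changed: Drops the two-player compute_control table and the outer refill loop entirely: B does one direct single-player flood fill on the board (repeatedly fill an empty square whose orthogonal neighbors all equal player), which is correct because a square becomes player-controlled exactly when the player's own marbles flood-fill it.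
import Mathlib
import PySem

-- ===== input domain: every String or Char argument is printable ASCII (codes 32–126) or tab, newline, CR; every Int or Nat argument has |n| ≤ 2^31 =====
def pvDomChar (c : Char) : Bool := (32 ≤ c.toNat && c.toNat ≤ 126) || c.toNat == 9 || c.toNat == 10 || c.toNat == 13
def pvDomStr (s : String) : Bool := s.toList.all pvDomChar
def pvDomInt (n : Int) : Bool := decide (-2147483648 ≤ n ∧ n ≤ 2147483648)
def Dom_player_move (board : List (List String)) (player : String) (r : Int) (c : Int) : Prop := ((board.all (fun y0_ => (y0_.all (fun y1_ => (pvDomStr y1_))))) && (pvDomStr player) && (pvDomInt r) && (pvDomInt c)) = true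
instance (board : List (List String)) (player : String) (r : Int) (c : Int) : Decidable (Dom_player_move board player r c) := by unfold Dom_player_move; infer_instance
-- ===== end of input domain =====

-- B replaces A's two-player control table + outer refill loop by one direct single-player
-- flood fill (simpler, not claimed faster); return value only, neither side mutates its input.

-- ===== PORT A =====
-- board[r][c] / board[r][c] = v, Python-exact via PySem (pyGetD/pySetD; all reads/writes are
-- in range under Pre_, where Python returns normally).
def pvCell (g : List (List String)) (r c : Int) : String :=
  PySem.List.pyGetD (PySem.List.pyGetD g r []) c ""

def pvSet (g : List (List String)) (r c : Int) (v : String) : List (List String) :=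
  PySem.List.pySetD g r (PySem.List.pySetD (PySem.List.pyGetD g r []) c v)

def orth_neighbors (r c : Int) : List (Int × Int) :=
  let orth_result : List (Int × Int) := []
  let orth_result := if r > 0 then orth_result ++ [(r - 1, c)] else orth_result
  let orth_result := if r < 4 - 1 then orth_result ++ [(r + 1, c)] else orth_result
  let orth_result := if c > 0 then orth_result ++ [(r, c - 1)] else orth_result
  let orth_result := if c < 4 - 1 then orth_result ++ [(r, c + 1)] else orth_result
  orth_result

-- one body of A's inner `for c` loop in compute_control
def ccStep (st : List (List String) × Bool) (r c : Int) : List (List String) × Bool :=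
  if pvCell st.1 r c = "." then
    match (orth_neighbors r c).map (fun p => pvCell st.1 p.1 p.2) with
    | [] => st
    | v0 :: rest =>
      if (v0 :: rest).all (fun v => v == v0 && !(v == ".")) then (pvSet st.1 r c v0, true) else st
  else st

-- one iteration of A's `while status` body (the nested for-loops, status reset to False)
def ccPass (control : List (List String)) : List (List String) × Bool :=
  (PySem.List.pyRange 0 4 1).foldl (fun st r =>
    (PySem.List.pyRange 0 4 1).foldl (fun st c => ccStep st r c) st) (control, false)

-- A's `while status` loop; fuel 17 is always enough: every repeated pass fills at least one
-- of the 16 squares, so the exit pass is reached within 17 passes.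
def ccLoop : Nat → List (List String) → List (List String)
  | 0, control => control
  | fuel + 1, control =>
      match ccPass control with
      | (control', status) => if status then ccLoop fuel control' else control'

def compute_control (board : List (List String)) : List (List String) :=
  let control := (PySem.List.pyRange 0 4 1).map (fun r =>
    (PySem.List.pyRange 0 4 1).map (fun c => pvCell board r c))
  ccLoop 17 control

-- one body of A's inner `for cc` loop in player_move
def pmStep (player : String) (control : List (List String))
    (st : List (List String) × Bool) (rr cc : Int) : List (List String) × Bool :=
  if pvCell st.1 rr cc = "." ∧ pvCell control rr cc = player then (pvSet st.1 rr cc player, true)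
  else st

def pmPass (player : String) (control board : List (List String)) : List (List String) × Bool :=
  (PySem.List.pyRange 0 4 1).foldl (fun st rr =>
    (PySem.List.pyRange 0 4 1).foldl (fun st cc => pmStep player control st rr cc) st)
    (board, false)

-- A's `while board_filled` loop (control recomputed after each pass); fuel 17 as above
def pmLoop (player : String) : Nat → List (List String) → List (List String) → List (List String)
  | 0, board, _ => board
  | fuel + 1, board, control =>
      match pmPass player control board with
      | (board', filled) => if filled then pmLoop player fuel board' (compute_control board') else board'

def player_move (board : List (List String)) (player : String) (r : Int) (c : Int) : List (List String) :=
  let board := board.map (fun row => row)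
  let board := pvSet board r c player
  pmLoop player 17 board (compute_control board)

-- ===== PORT B =====
-- one body of B's inner `for cc` loop: fill an empty square whose neighbors all equal player
def flStep (player : String) (st : List (List String) × Bool) (rr cc : Int) :
    List (List String) × Bool :=
  if pvCell st.1 rr cc = "." ∧ (orth_neighbors rr cc).all (fun p => pvCell st.1 p.1 p.2 == player)
  then (pvSet st.1 rr cc player, true) else st

def flPass (player : String) (board : List (List String)) : List (List String) × Bool :=
  (PySem.List.pyRange 0 4 1).foldl (fun st rr =>
    (PySem.List.pyRange 0 4 1).foldl (fun st cc => flStep player st rr cc) st)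
    (board, false)

-- B's `while changed` loop; fuel 17 as above (each repeated pass fills a square)
def flLoop (player : String) : Nat → List (List String) → List (List String)
  | 0, board => board
  | fuel + 1, board =>
      match flPass player board with
      | (board', changed) => if changed then flLoop player fuel board' else board'

def player_move_alt (board : List (List String)) (player : String) (r : Int) (c : Int) :
    List (List String) :=
  let board := board.map (fun row => row)
  let board := pvSet board r c player
  if player ≠ "." then flLoop player 17 board else board

-- ===== PRECONDITION & SPEC =====
-- Pre_ excludes (a) boards that raise in Python (fewer than 4 rows, or one of the first 4 rows
-- shorter than 4, or r/c out of range for the placement), and (b) player == ".", on which A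
-- loops forever whenever some square stays empty and uncontrolled; on the player == "." inputs
-- where A does terminate it makes no fill at all, and B returns that same board.
def Pre_player_move (board : List (List String)) (player : String) (r : Int) (c : Int) : Prop :=
  4 ≤ board.length ∧ (∀ i : Nat, i < 4 → 4 ≤ (board.getD i []).length) ∧
  PySem.Raise.InRange board.length r ∧
  PySem.Raise.InRange (PySem.List.pyGetD board r []).length c ∧
  player ≠ "."
instance (board : List (List String)) (player : String) (r : Int) (c : Int) :
    Decidable (Pre_player_move board player r c) := by unfold Pre_player_move; infer_instance

def pvWitness_player_move : List (List String) × String × Int × Int :=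
  ([[".", ".", ".", "."], [".", "B", ".", "."], [".", ".", ".", "."], [".", ".", ".", "W"]], "B", 0, 0)

def Spec_player_move (board : List (List String)) (player : String) (r : Int) (c : Int) (out : List (List String)) : Prop := out = player_move_alt board player r c
instance (board : List (List String)) (player : String) (r : Int) (c : Int) (out : List (List String)) : Decidable (Spec_player_move board player r c out) := by unfold Spec_player_move; infer_instance

-- ===== CLAIM (what is proved, stated in full; the proofs are below) =====
def Claim_equal_player_move : Prop := ∀ (board : List (List String)) (player : String) (r : Int) (c : Int), Dom_player_move board player r c → Pre_player_move board player r c → Spec_player_move board player r c (player_move board player r c)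

-- ===== LEMMAS AND PROOFS =====

-- ---------- the 16 squares of the 4x4 region ----------
def pvPairs : List (Int × Int) :=
  [(0,0),(0,1),(0,2),(0,3),(1,0),(1,1),(1,2),(1,3),(2,0),(2,1),(2,2),(2,3),(3,0),(3,1),(3,2),(3,3)]

def pvShape (g : List (List String)) : Prop :=
  4 ≤ g.length ∧ ∀ i : Nat, i < 4 → 4 ≤ (g.getD i []).length

lemma pvPairs_bounds : ∀ rc ∈ pvPairs, 0 ≤ rc.1 ∧ rc.1 < 4 ∧ 0 ≤ rc.2 ∧ rc.2 < 4 := by decide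

lemma pvPairs_nodup : pvPairs.Nodup := by decide

lemma pvPairs_length : pvPairs.length = 16 := by decide

lemma orth_mem_pvPairs : ∀ rc ∈ pvPairs, ∀ p ∈ orth_neighbors rc.1 rc.2, p ∈ pvPairs := by decide

lemma orth_ne_nil : ∀ rc ∈ pvPairs, orth_neighbors rc.1 rc.2 ≠ [] := by decide

lemma natpair_mem_pvPairs (i j : Nat) (hi : i < 4) (hj : j < 4) : ((i : Int), (j : Int)) ∈ pvPairs := by
  interval_cases i <;> interval_cases j <;> decide

-- ---------- pvCell / pvSet primitives ----------
lemma pyGetD_toNat {α : Type} (xs : List α) (i : Int) (d : α) (h : 0 ≤ i) :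
    PySem.List.pyGetD xs i d = xs.getD i.toNat d := by
  obtain ⟨n, rfl⟩ := Int.eq_ofNat_of_zero_le h
  simp [PySem.List.pyGetD_natCast]

lemma pvCell_nonneg (g : List (List String)) (r c : Int) (hr : 0 ≤ r) (hc : 0 ≤ c) :
    pvCell g r c = (g.getD r.toNat []).getD c.toNat "" := by
  simp [pvCell, pyGetD_toNat _ _ _ hr, pyGetD_toNat _ _ _ hc]

lemma pvSet_nonneg (g : List (List String)) (r c : Int) (v : String) (hr : 0 ≤ r) (hc : 0 ≤ c) :
    pvSet g r c v = g.set r.toNat ((g.getD r.toNat []).set c.toNat v) := by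
  obtain ⟨i, rfl⟩ := Int.eq_ofNat_of_zero_le hr
  obtain ⟨j, rfl⟩ := Int.eq_ofNat_of_zero_le hc
  simp [pvSet, PySem.List.pySetD_natCast, pyGetD_toNat]

lemma getD_set_ne {α : Type} (xs : List α) (k i : Nat) (y : α) (d : α) (h : i ≠ k) :
    (xs.set k y).getD i d = xs.getD i d := by
  simp [List.getD_eq_getElem?_getD, List.getElem?_set_ne (Ne.symm h)]

lemma getD_set_self {α : Type} (xs : List α) (k : Nat) (y : α) (d : α) (h : k < xs.length) :
    (xs.set k y).getD k d = y := by
  simp [List.getD_eq_getElem?_getD, h]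

-- unchanged cell after a set at a different in-region square
lemma pvCell_pvSet_ne (g : List (List String)) (r c r' c' : Int) (v : String)
    (hr : 0 ≤ r) (hc : 0 ≤ c) (hr' : 0 ≤ r') (hc' : 0 ≤ c') (hne : (r, c) ≠ (r', c')) :
    pvCell (pvSet g r' c' v) r c = pvCell g r c := by
  rw [pvSet_nonneg _ _ _ _ hr' hc', pvCell_nonneg _ _ _ hr hc, pvCell_nonneg _ _ _ hr hc]
  by_cases hrr : r.toNat = r'.toNat
  · have hre : r = r' := by omega
    have hcc : c.toNat ≠ c'.toNat := by
      intro hcn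
      exact hne (by rw [hre]; congr 1; omega)
    subst hre
    by_cases hlen : r.toNat < g.length
    · rw [getD_set_self _ _ _ _ hlen, getD_set_ne _ _ _ _ _ hcc]
    · rw [List.set_eq_of_length_le (by omega)]
  · rw [getD_set_ne _ _ _ _ _ hrr]

lemma pvCell_pvSet_self (g : List (List String)) (r c : Int) (v : String)
    (hr : 0 ≤ r) (hc : 0 ≤ c) (hlr : r.toNat < g.length) (hlc : c.toNat < (g.getD r.toNat []).length) :
    pvCell (pvSet g r c v) r c = v := by
  rw [pvSet_nonneg _ _ _ _ hr hc, pvCell_nonneg _ _ _ hr hc,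
    getD_set_self _ _ _ _ hlr, getD_set_self _ _ _ _ hlc]

lemma pyIdx?_lt (n : Nat) (i : Int) (k : Nat) (h : PySem.List.pyIdx? n i = some k) : k < n := by
  unfold PySem.List.pyIdx? at h
  split_ifs at h <;> simp_all <;> omega

lemma length_pvSet (g : List (List String)) (r c : Int) (v : String) :
    (pvSet g r c v).length = g.length := PySem.List.length_pySetD ..

lemma pySetD_cases {α : Type} (xs : List α) (i : Int) (v : α) :
    PySem.List.pySetD xs i v =
      match PySem.List.pyIdx? xs.length i with
      | none => xs
      | some k => xs.set k v := by
  unfold PySem.List.pySetD PySem.List.pySet?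
  cases PySem.List.pyIdx? xs.length i <;> simp

lemma rowlen_pvSet (g : List (List String)) (r c : Int) (v : String) (i : Nat) :
    ((pvSet g r c v).getD i []).length = (g.getD i []).length := by
  unfold pvSet
  rw [pySetD_cases g r (PySem.List.pySetD (PySem.List.pyGetD g r []) c v)]
  cases h : PySem.List.pyIdx? g.length r with
  | none => simp
  | some k =>
    have hk : k < g.length := pyIdx?_lt _ _ _ h
    have hrow : PySem.List.pyGetD g r [] = g[k] := by
      unfold PySem.List.pyGetD PySem.List.pyGet?
      rw [h]
      simp [hk]
    by_cases hik : i = k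
    · subst hik
      rw [getD_set_self _ _ _ _ hk, hrow, PySem.List.length_pySetD,
        List.getD_eq_getElem _ _ hk]
    · simp only [getD_set_ne _ _ _ _ _ hik]

lemma pvShape_pvSet (g : List (List String)) (r c : Int) (v : String) (hs : pvShape g) :
    pvShape (pvSet g r c v) := by
  obtain ⟨h1, h2⟩ := hs
  exact ⟨by rw [length_pvSet]; exact h1, fun i hi => by rw [rowlen_pvSet]; exact h2 i hi⟩

lemma pvShape_bounds (g : List (List String)) (rc : Int × Int) (hs : pvShape g) (h : rc ∈ pvPairs) :
    rc.1.toNat < g.length ∧ rc.2.toNat < (g.getD rc.1.toNat []).length := by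
  obtain ⟨h1, h2, h3, h4⟩ := pvPairs_bounds rc h
  obtain ⟨hl, hrow⟩ := hs
  have hr4 : rc.1.toNat < 4 := by omega
  exact ⟨by omega, by have := hrow rc.1.toNat hr4; omega⟩


-- ---------- generic sequential fill pass / loop ----------
def gStep (f : List (List String) → Int → Int → Option String)
    (st : List (List String) × Bool) (rc : Int × Int) : List (List String) × Bool :=
  match f st.1 rc.1 rc.2 with
  | some v => (pvSet st.1 rc.1 rc.2 v, true)
  | none => st

def gPass (f : List (List String) → Int → Int → Option String) (g : List (List String)) :
    List (List String) × Bool :=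
  List.foldl (gStep f) (g, false) pvPairs

def gLoop (f : List (List String) → Int → Int → Option String) :
    Nat → List (List String) → List (List String)
  | 0, g => g
  | fuel + 1, g =>
      match gPass f g with
      | (g', s) => if s then gLoop f fuel g' else g'

-- fills happen only on "." squares and never write "."
def gFillOk (f : List (List String) → Int → Int → Option String) : Prop :=
  ∀ g r c v, f g r c = some v → pvCell g r c = "." ∧ v ≠ "."

lemma gFold_flag_mono (f : List (List String) → Int → Int → Option String) :
    ∀ (l : List (Int × Int)) (st : List (List String) × Bool), st.2 = true →
      (List.foldl (gStep f) st l).2 = true := by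
  intro l
  induction l with
  | nil => intro st h; simpa using h
  | cons a l ih =>
    intro st h
    rw [List.foldl_cons]
    apply ih
    unfold gStep
    cases hf : f st.1 a.1 a.2 <;> simp [h]

lemma gFold_false (f : List (List String) → Int → Int → Option String) :
    ∀ (l : List (Int × Int)) (st : List (List String) × Bool),
      (List.foldl (gStep f) st l).2 = false →
      List.foldl (gStep f) st l = st ∧ ∀ rc ∈ l, f st.1 rc.1 rc.2 = none := by
  intro l
  induction l with
  | nil => intro st _; exact ⟨rfl, by simp⟩
  | cons a l ih =>
    intro st h
    rw [List.foldl_cons] at h ⊢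
    cases hf : f st.1 a.1 a.2 with
    | some v =>
      exfalso
      have : (gStep f st a).2 = true := by unfold gStep; rw [hf]
      rw [gFold_flag_mono f l _ this] at h
      exact Bool.true_eq_false.mp h
    | none =>
      have hstep : gStep f st a = st := by unfold gStep; rw [hf]
      rw [hstep] at h ⊢
      obtain ⟨h1, h2⟩ := ih st h
      refine ⟨h1, ?_⟩
      intro rc hrc
      rcases List.mem_cons.mp hrc with h' | h'
      · subst h'; exact hf
      · exact h2 rc h'

lemma gFold_none (f : List (List String) → Int → Int → Option String) :
    ∀ (l : List (Int × Int)) (g : List (List String)) (fl : Bool),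
      (∀ rc ∈ l, f g rc.1 rc.2 = none) → List.foldl (gStep f) (g, fl) l = (g, fl) := by
  intro l
  induction l with
  | nil => intro g fl _; rfl
  | cons a l ih =>
    intro g fl h
    rw [List.foldl_cons]
    have hstep : gStep f (g, fl) a = (g, fl) := by
      unfold gStep; rw [h a (List.mem_cons_self)]
    rw [hstep]
    exact ih g fl (fun rc hrc => h rc (List.mem_cons_of_mem _ hrc))

lemma gLoop_of_none (f : List (List String) → Int → Int → Option String)
    (fuel : Nat) (g : List (List String)) (h : ∀ rc ∈ pvPairs, f g rc.1 rc.2 = none) :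
    gLoop f (fuel + 1) g = g := by
  unfold gLoop gPass
  rw [gFold_none f pvPairs g false h]
  simp

lemma gFold_untouched (f : List (List String) → Int → Int → Option String) :
    ∀ (l : List (Int × Int)), (∀ rc ∈ l, rc ∈ pvPairs) →
      ∀ (rc0 : Int × Int), rc0 ∈ pvPairs → rc0 ∉ l →
      ∀ (st : List (List String) × Bool),
        pvCell (List.foldl (gStep f) st l).1 rc0.1 rc0.2 = pvCell st.1 rc0.1 rc0.2 := by
  intro l
  induction l with
  | nil => intro _ rc0 _ _ st; rfl
  | cons a l ih =>
    intro hl rc0 h0 hn st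
    rw [List.foldl_cons]
    have hrec := ih (fun rc h => hl rc (List.mem_cons_of_mem _ h)) rc0 h0
      (fun h => hn (List.mem_cons_of_mem _ h)) (gStep f st a)
    rw [hrec]
    unfold gStep
    cases hf : f st.1 a.1 a.2 with
    | none => rfl
    | some v =>
      simp only
      obtain ⟨ha1, _, ha2, _⟩ := pvPairs_bounds a (hl a List.mem_cons_self)
      obtain ⟨h01, _, h02, _⟩ := pvPairs_bounds rc0 h0
      refine pvCell_pvSet_ne _ _ _ _ _ _ h01 h02 ha1 ha2 ?_
      intro hpe
      apply hn
      have : rc0 = a := Prod.ext (congrArg Prod.fst hpe) (congrArg Prod.snd hpe)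
      rw [this]; exact List.mem_cons_self
    
lemma gFold_inv (f : List (List String) → Int → Int → Option String) (P : List (List String) → Prop)
    (hstep : ∀ g rc v, rc ∈ pvPairs → pvShape g → P g → f g rc.1 rc.2 = some v →
      P (pvSet g rc.1 rc.2 v)) :
    ∀ (l : List (Int × Int)), (∀ rc ∈ l, rc ∈ pvPairs) →
      ∀ (st : List (List String) × Bool), pvShape st.1 → P st.1 →
        pvShape (List.foldl (gStep f) st l).1 ∧ P (List.foldl (gStep f) st l).1 := by
  intro l
  induction l with
  | nil => intro _ st h1 h2; exact ⟨h1, h2⟩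
  | cons a l ih =>
    intro hl st h1 h2
    rw [List.foldl_cons]
    have hmem := hl a List.mem_cons_self
    have hl' := fun rc h => hl rc (List.mem_cons_of_mem _ h)
    cases hf : f st.1 a.1 a.2 with
    | none =>
      have hstep' : gStep f st a = st := by unfold gStep; rw [hf]
      rw [hstep']
      exact ih hl' st h1 h2
    | some v =>
      have hstep' : gStep f st a = (pvSet st.1 a.1 a.2 v, true) := by unfold gStep; rw [hf]
      rw [hstep']
      exact ih hl' _ (pvShape_pvSet _ _ _ _ h1) (hstep st.1 a v hmem h1 h2 hf)

lemma gLoop_inv (f : List (List String) → Int → Int → Option String) (P : List (List String) → Prop)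
    (hstep : ∀ g rc v, rc ∈ pvPairs → pvShape g → P g → f g rc.1 rc.2 = some v →
      P (pvSet g rc.1 rc.2 v)) :
    ∀ (fuel : Nat) (g : List (List String)), pvShape g → P g →
      pvShape (gLoop f fuel g) ∧ P (gLoop f fuel g) := by
  intro fuel
  induction fuel with
  | zero => intro g h1 h2; exact ⟨h1, h2⟩
  | succ n ih =>
    intro g h1 h2
    unfold gLoop gPass
    have h := gFold_inv f P hstep pvPairs (fun rc h => h) (g, false) h1 h2
    cases hp : List.foldl (gStep f) (g, false) pvPairs with
    | mk g' s =>
      rw [hp] at h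
      by_cases hs : s = true
      · simp only [hs, if_true]
        exact ih g' h.1 h.2
      · simp only [Bool.not_eq_true] at hs
        simp only [hs, Bool.false_eq_true, if_false]
        exact h

lemma gLoop_shape (f : List (List String) → Int → Int → Option String)
    (fuel : Nat) (g : List (List String)) (h : pvShape g) : pvShape (gLoop f fuel g) :=
  (gLoop_inv f (fun _ => True) (fun _ _ _ _ _ _ _ => trivial) fuel g h trivial).1

-- persistence: a non-"." square never changes
lemma gLoop_persist (f : List (List String) → Int → Int → Option String) (hok : gFillOk f)
    (rc0 : Int × Int) (h0 : rc0 ∈ pvPairs) (x : String) (hx : x ≠ ".")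
    (fuel : Nat) (g : List (List String)) (hs : pvShape g)
    (hcell : pvCell g rc0.1 rc0.2 = x) : pvCell (gLoop f fuel g) rc0.1 rc0.2 = x := by
  refine (gLoop_inv f (fun g => pvCell g rc0.1 rc0.2 = x) ?_ fuel g hs hcell).2
  intro g rc v hrc hsg hP hf
  obtain ⟨hdot, _⟩ := hok g rc.1 rc.2 v hf
  obtain ⟨ha1, _, ha2, _⟩ := pvPairs_bounds rc hrc
  obtain ⟨h01, _, h02, _⟩ := pvPairs_bounds rc0 h0
  have hne : (rc0.1, rc0.2) ≠ (rc.1, rc.2) := by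
    intro h
    rw [show rc0.1 = rc.1 from congrArg Prod.fst h, show rc0.2 = rc.2 from congrArg Prod.snd h,
      hdot] at hP
    exact hx hP.symm
  rw [pvCell_pvSet_ne _ _ _ _ _ _ h01 h02 ha1 ha2 hne]
  exact hP

-- ---------- termination: the number of empty squares strictly decreases ----------
def countE (g : List (List String)) : Nat :=
  List.countP (fun rc => pvCell g rc.1 rc.2 == ".") pvPairs

lemma countP_lt_of {α : Type} (l : List α) (p q : α → Bool)
    (hmono : ∀ x ∈ l, q x = true → p x = true)
    (a : α) (ha : a ∈ l) (hpa : p a = true) (hqa : q a = false) :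
    l.countP q < l.countP p := by
  induction l with
  | nil => cases ha
  | cons b l ih =>
    rw [List.countP_cons, List.countP_cons]
    rcases List.mem_cons.mp ha with h | h
    · subst h
      have h1 : List.countP q l ≤ List.countP p l :=
        List.countP_mono_left (fun x hx => hmono x (List.mem_cons_of_mem _ hx))
      rw [hpa, hqa]
      simp only [if_true, Bool.false_eq_true, if_false]
      omega
    · have := ih (fun x hx h' => hmono x (List.mem_cons_of_mem _ hx) h') h
      have hb : q b = true → p b = true := hmono b List.mem_cons_self
      cases hq : q b
      · cases hp : p b <;> simp <;> omega
      · rw [hb hq]; simpa using this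

lemma countE_step (f : List (List String) → Int → Int → Option String) (hok : gFillOk f)
    (g : List (List String)) (rc : Int × Int) (v : String)
    (hrc : rc ∈ pvPairs) (hs : pvShape g) (hf : f g rc.1 rc.2 = some v) :
    countE (pvSet g rc.1 rc.2 v) < countE g := by
  obtain ⟨hdot, hv⟩ := hok g rc.1 rc.2 v hf
  obtain ⟨ha1, _, ha2, _⟩ := pvPairs_bounds rc hrc
  obtain ⟨hb1, hb2⟩ := pvShape_bounds g rc hs hrc
  unfold countE
  refine countP_lt_of pvPairs _ _ ?_ rc hrc (by simp [hdot]) ?_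
  · intro x hx hq
    by_cases hxe : (x.1, x.2) = (rc.1, rc.2)
    · have hx1 : x.1 = rc.1 := congrArg Prod.fst hxe
      have hx2 : x.2 = rc.2 := congrArg Prod.snd hxe
      rw [hx1, hx2, pvCell_pvSet_self _ _ _ _ ha1 ha2 hb1 hb2] at hq
      simp only [beq_iff_eq] at hq
      exact absurd hq hv
    · obtain ⟨hx1, _, hx2, _⟩ := pvPairs_bounds x hx
      rwa [pvCell_pvSet_ne _ _ _ _ _ _ hx1 hx2 ha1 ha2 hxe] at hq
  · rw [pvCell_pvSet_self _ _ _ _ ha1 ha2 hb1 hb2]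
    simp [hv]

lemma countE_fold (f : List (List String) → Int → Int → Option String) (hok : gFillOk f) :
    ∀ (l : List (Int × Int)), (∀ rc ∈ l, rc ∈ pvPairs) →
      ∀ (st : List (List String) × Bool), pvShape st.1 →
        countE (List.foldl (gStep f) st l).1 ≤ countE st.1 ∧
        ((List.foldl (gStep f) st l).2 = true → st.2 = true ∨
          countE (List.foldl (gStep f) st l).1 < countE st.1) := by
  intro l
  induction l with
  | nil => intro _ st _; exact ⟨le_refl _, fun h => Or.inl h⟩
  | cons a l ih =>
    intro hl st hs
    rw [List.foldl_cons]
    have hmem := hl a List.mem_cons_self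
    have hl' := fun rc h => hl rc (List.mem_cons_of_mem _ h)
    cases hf : f st.1 a.1 a.2 with
    | none =>
      have hstep : gStep f st a = st := by unfold gStep; rw [hf]
      rw [hstep]
      exact ih hl' st hs
    | some v =>
      have hstep : gStep f st a = (pvSet st.1 a.1 a.2 v, true) := by unfold gStep; rw [hf]
      rw [hstep]
      have hdec := countE_step f hok st.1 a v hmem hs hf
      have hrec := ih hl' (pvSet st.1 a.1 a.2 v, true) (pvShape_pvSet _ _ _ _ hs)
      simp only at hrec
      exact ⟨by omega, fun _ => Or.inr (by omega)⟩

lemma countE_le (g : List (List String)) : countE g ≤ 16 := by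
  have := List.countP_le_length (l := pvPairs) (p := fun rc => pvCell g rc.1 rc.2 == ".")
  rw [pvPairs_length] at this
  exact this

lemma gLoop_fix (f : List (List String) → Int → Int → Option String) (hok : gFillOk f) :
    ∀ (fuel : Nat) (g : List (List String)), pvShape g → countE g < fuel →
      gPass f (gLoop f fuel g) = (gLoop f fuel g, false) := by
  intro fuel
  induction fuel with
  | zero => intro g _ h; omega
  | succ n ih =>
    intro g hs hc
    unfold gLoop
    cases hp : gPass f g with
    | mk g' s =>
      have hfold := countE_fold f hok pvPairs (fun rc h => h) (g, false) hs
      unfold gPass at hp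
      rw [hp] at hfold
      have hshape : pvShape g' := by
        have := gFold_inv f (fun _ => True) (fun _ _ _ _ _ _ _ => trivial) pvPairs
          (fun rc h => h) (g, false) hs trivial
        rw [hp] at this
        exact this.1
      by_cases hstrue : s = true
      · subst hstrue
        simp only [if_true]
        have hdec : countE g' < countE g := by
          rcases hfold.2 rfl with h | h
          · exact absurd h (by simp)
          · exact h
        exact ih g' hshape (by omega)
      · simp only [Bool.not_eq_true] at hstrue
        subst hstrue
        simp only [Bool.false_eq_true, if_false]
        have := gFold_false f pvPairs (g, false) (by rw [hp])
        rw [hp] at this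
        have hg : g' = g := congrArg Prod.fst this.1
        subst hg
        unfold gPass
        rw [gFold_none f pvPairs g' false this.2]

-- a pass whose fill condition reads only the square itself (plus fixed data) acts pointwise
lemma gPass_local (f : List (List String) → Int → Int → Option String)
    (hloc : ∀ g g' r c, pvCell g r c = pvCell g' r c → f g r c = f g' r c)
    (g : List (List String)) (hs : pvShape g) (rc : Int × Int) (hrc : rc ∈ pvPairs) :
    pvCell (gPass f g).1 rc.1 rc.2 =
      match f g rc.1 rc.2 with
      | some v => v
      | none => pvCell g rc.1 rc.2 := by
  obtain ⟨l1, l2, hsplit⟩ := List.append_of_mem hrc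
  have hnd := pvPairs_nodup
  rw [hsplit] at hnd
  have hn1 : rc ∉ l1 := by
    intro h
    exact (List.nodup_append.mp hnd).2.2 rc h rc List.mem_cons_self rfl
  have hn2 : rc ∉ l2 := by
    have := ((List.nodup_append.mp hnd).2.1)
    exact (List.nodup_cons.mp this).1
  have hsub : ∀ x, x ∈ pvPairs ↔ x ∈ l1 ++ rc :: l2 := fun x => by rw [hsplit]
  have hsub1 : ∀ x ∈ l1, x ∈ pvPairs := fun x h => (hsub x).mpr (List.mem_append_left _ h)
  have hsub2 : ∀ x ∈ l2, x ∈ pvPairs := fun x h =>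
    (hsub x).mpr (List.mem_append_right _ (List.mem_cons_of_mem _ h))
  unfold gPass
  rw [hsplit, List.foldl_append, List.foldl_cons]
  set st1 := List.foldl (gStep f) (g, false) l1 with hst1
  have hcell1 : pvCell st1.1 rc.1 rc.2 = pvCell g rc.1 rc.2 :=
    gFold_untouched f l1 hsub1 rc hrc hn1 (g, false)
  have hshape1 : pvShape st1.1 :=
    (gFold_inv f (fun _ => True) (fun _ _ _ _ _ _ _ => trivial) l1 hsub1 (g, false) hs trivial).1
  have hfrc : f st1.1 rc.1 rc.2 = f g rc.1 rc.2 := hloc _ _ _ _ hcell1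
  cases hf : f g rc.1 rc.2 with
  | none =>
    have hstep : gStep f st1 rc = st1 := by unfold gStep; rw [hfrc, hf]
    rw [hstep, gFold_untouched f l2 hsub2 rc hrc hn2 st1, hcell1]
  | some v =>
    have hstep : gStep f st1 rc = (pvSet st1.1 rc.1 rc.2 v, true) := by
      unfold gStep; rw [hfrc, hf]
    rw [hstep, gFold_untouched f l2 hsub2 rc hrc hn2 _]
    obtain ⟨ha1, _, ha2, _⟩ := pvPairs_bounds rc hrc
    obtain ⟨hb1, hb2⟩ := pvShape_bounds st1.1 rc hshape1 hrc
    exact pvCell_pvSet_self _ _ _ _ ha1 ha2 hb1 hb2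


-- ---------- the three fill conditions ----------
def ccFill (g : List (List String)) (r c : Int) : Option String :=
  if pvCell g r c = "." then
    match (orth_neighbors r c).map (fun p => pvCell g p.1 p.2) with
    | [] => none
    | v0 :: rest =>
      if (v0 :: rest).all (fun v => v == v0 && !(v == ".")) then some v0 else none
  else none

def flFill (player : String) (g : List (List String)) (r c : Int) : Option String :=
  if pvCell g r c = "." ∧ (orth_neighbors r c).all (fun p => pvCell g p.1 p.2 == player)
  then some player else none

def pmFill (player : String) (control : List (List String)) (g : List (List String)) (r c : Int) :
    Option String :=
  if pvCell g r c = "." ∧ pvCell control r c = player then some player else none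

lemma ccStep_eq (st : List (List String) × Bool) (r c : Int) :
    ccStep st r c = gStep ccFill st (r, c) := by
  unfold ccStep gStep ccFill
  by_cases h : pvCell st.1 r c = "."
  · simp only [h, if_true]
    cases hnv : (orth_neighbors r c).map (fun p => pvCell st.1 p.1 p.2) with
    | nil => rfl
    | cons v0 rest =>
      by_cases ha : (v0 :: rest).all (fun v => v == v0 && !(v == ".")) <;> simp [ha]
  · simp [h]

lemma flStep_eq (player : String) (st : List (List String) × Bool) (r c : Int) :
    flStep player st r c = gStep (flFill player) st (r, c) := by
  unfold flStep gStep flFill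
  by_cases h : pvCell st.1 r c = "." ∧
      (orth_neighbors r c).all (fun p => pvCell st.1 p.1 p.2 == player)
  · simp [h]
  · simp only [if_neg h]

lemma pmStep_eq (player : String) (control : List (List String))
    (st : List (List String) × Bool) (r c : Int) :
    pmStep player control st r c = gStep (pmFill player control) st (r, c) := by
  unfold pmStep gStep pmFill
  by_cases h : pvCell st.1 r c = "." ∧ pvCell control r c = player
  · simp [h]
  · simp only [if_neg h]

lemma foldl_nested (step : (List (List String) × Bool) → Int → Int → List (List String) × Bool)
    (st : List (List String) × Bool) :
    (PySem.List.pyRange 0 4 1).foldl (fun st r =>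
      (PySem.List.pyRange 0 4 1).foldl (fun st c => step st r c) st) st =
    List.foldl (fun st rc => step st rc.1 rc.2) st pvPairs := by
  rw [show PySem.List.pyRange 0 4 1 = [0, 1, 2, 3] from by decide]
  simp [pvPairs, List.foldl]

lemma ccPass_eq (g : List (List String)) : ccPass g = gPass ccFill g := by
  unfold ccPass gPass
  rw [foldl_nested ccStep (g, false)]
  simp only [ccStep_eq]

lemma flPass_eq (player : String) (g : List (List String)) :
    flPass player g = gPass (flFill player) g := by
  unfold flPass gPass
  rw [foldl_nested (flStep player) (g, false)]
  simp only [flStep_eq]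

lemma pmPass_eq (player : String) (control g : List (List String)) :
    pmPass player control g = gPass (pmFill player control) g := by
  unfold pmPass gPass
  rw [foldl_nested (pmStep player control) (g, false)]
  simp only [pmStep_eq]

lemma ccLoop_eq : ∀ (fuel : Nat) (g : List (List String)), ccLoop fuel g = gLoop ccFill fuel g := by
  intro fuel
  induction fuel with
  | zero => intro g; rfl
  | succ n ih =>
    intro g
    unfold ccLoop gLoop
    rw [ccPass_eq]
    cases gPass ccFill g with
    | mk g' s => cases s <;> simp [ih]

lemma flLoop_eq (player : String) : ∀ (fuel : Nat) (g : List (List String)),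
    flLoop player fuel g = gLoop (flFill player) fuel g := by
  intro fuel
  induction fuel with
  | zero => intro g; rfl
  | succ n ih =>
    intro g
    unfold flLoop gLoop
    rw [flPass_eq]
    cases gPass (flFill player) g with
    | mk g' s => cases s <;> simp [ih]

def ccInit (b : List (List String)) : List (List String) :=
  (PySem.List.pyRange 0 4 1).map (fun r => (PySem.List.pyRange 0 4 1).map (fun c => pvCell b r c))

lemma compute_control_eq (b : List (List String)) :
    compute_control b = gLoop ccFill 17 (ccInit b) := by
  unfold compute_control ccInit
  rw [ccLoop_eq]

-- ---------- facts about the fills ----------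
lemma ccFill_spec (g : List (List String)) (r c : Int) (v : String) (h : ccFill g r c = some v) :
    pvCell g r c = "." ∧ v ≠ "." ∧ ∀ p ∈ orth_neighbors r c, pvCell g p.1 p.2 = v := by
  unfold ccFill at h
  by_cases hdot : pvCell g r c = "."
  · rw [if_pos hdot] at h
    cases hnv : (orth_neighbors r c).map (fun p => pvCell g p.1 p.2) with
    | nil => rw [hnv] at h; exact absurd h (by simp)
    | cons v0 rest =>
      rw [hnv] at h
      have h' : (if (v0 :: rest).all (fun v => v == v0 && !(v == ".")) then some v0 else none) = some v := h
      by_cases ha : (v0 :: rest).all (fun v => v == v0 && !(v == "."))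
      · rw [if_pos ha] at h' 
        have hv : v = v0 := (Option.some_inj.mp h').symm
        have hall := List.all_eq_true.mp ha
        have hv0 := hall v0 List.mem_cons_self
        simp only [beq_self_eq_true, Bool.true_and, Bool.not_eq_eq_eq_not, Bool.not_true,
          beq_eq_false_iff_ne, ne_eq] at hv0
        refine ⟨hdot, by rw [hv]; simpa using hv0, ?_⟩
        intro p hp
        have hmem : pvCell g p.1 p.2 ∈ (orth_neighbors r c).map (fun p => pvCell g p.1 p.2) :=
          List.mem_map_of_mem hp
        rw [hnv] at hmem
        have := hall _ hmem
        simp only [Bool.and_eq_true, beq_iff_eq] at this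
        rw [hv]
        exact this.1
      · rw [if_neg ha] at h'; exact absurd h' (by simp)
  · rw [if_neg hdot] at h; exact absurd h (by simp)

lemma ccFill_ok : gFillOk ccFill := by
  intro g r c v h
  obtain ⟨h1, h2, _⟩ := ccFill_spec g r c v h
  exact ⟨h1, h2⟩

lemma ccFill_some_player (g : List (List String)) (rc : Int × Int) (player : String)
    (hrc : rc ∈ pvPairs) (hp : player ≠ ".")
    (hdot : pvCell g rc.1 rc.2 = ".")
    (hnb : ∀ p ∈ orth_neighbors rc.1 rc.2, pvCell g p.1 p.2 = player) :
    ccFill g rc.1 rc.2 = some player := by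
  unfold ccFill
  rw [if_pos hdot]
  cases hnv : (orth_neighbors rc.1 rc.2).map (fun p => pvCell g p.1 p.2) with
  | nil => exact absurd (List.map_eq_nil_iff.mp hnv) (orth_ne_nil rc hrc)
  | cons v0 rest =>
    have hv0 : v0 = player := by
      have : v0 ∈ (orth_neighbors rc.1 rc.2).map (fun p => pvCell g p.1 p.2) := by
        rw [hnv]; exact List.mem_cons_self
      obtain ⟨p, hpmem, hpv⟩ := List.mem_map.mp this
      rw [← hpv]; exact hnb p hpmem
    have hall : (v0 :: rest).all (fun v => v == v0 && !(v == ".")) = true := by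
      rw [← hnv, hv0]
      refine List.all_eq_true.mpr ?_
      intro x hx
      obtain ⟨p, hpmem, hpv⟩ := List.mem_map.mp hx
      rw [← hpv, hnb p hpmem]
      simp [hp]
    show (if (v0 :: rest).all (fun v => v == v0 && !(v == ".")) then some v0 else none) = some player
    rw [if_pos hall, hv0]

lemma flFill_spec (player : String) (g : List (List String)) (r c : Int) (v : String)
    (h : flFill player g r c = some v) :
    v = player ∧ pvCell g r c = "." ∧ ∀ p ∈ orth_neighbors r c, pvCell g p.1 p.2 = player := by
  unfold flFill at h
  by_cases hc : pvCell g r c = "." ∧ (orth_neighbors r c).all (fun p => pvCell g p.1 p.2 == player)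
  · rw [if_pos hc] at h
    refine ⟨(Option.some_inj.mp h).symm, hc.1, ?_⟩
    intro p hp
    have := List.all_eq_true.mp hc.2 p hp
    simpa using this
  · rw [if_neg hc] at h; exact absurd h (by simp)

lemma flFill_ok (player : String) (hp : player ≠ ".") : gFillOk (flFill player) := by
  intro g r c v h
  obtain ⟨hv, hdot, _⟩ := flFill_spec player g r c v h
  exact ⟨hdot, hv ▸ hp⟩

lemma flFill_none (player : String) (g : List (List String)) (r c : Int)
    (h : flFill player g r c = none) :
    ¬ (pvCell g r c = "." ∧ ∀ p ∈ orth_neighbors r c, pvCell g p.1 p.2 = player) := by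
  intro ⟨h1, h2⟩
  unfold flFill at h
  rw [if_pos ⟨h1, List.all_eq_true.mpr (fun p hp => by simp [h2 p hp])⟩] at h
  exact absurd h (by simp)

lemma pmFill_spec (player : String) (control g : List (List String)) (r c : Int) (v : String)
    (h : pmFill player control g r c = some v) :
    v = player ∧ pvCell g r c = "." ∧ pvCell control r c = player := by
  unfold pmFill at h
  by_cases hc : pvCell g r c = "." ∧ pvCell control r c = player
  · rw [if_pos hc] at h
    exact ⟨(Option.some_inj.mp h).symm, hc⟩
  · rw [if_neg hc] at h; exact absurd h (by simp)

lemma pmFill_ok (player : String) (control : List (List String)) (hp : player ≠ ".") :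
    gFillOk (pmFill player control) := by
  intro g r c v h
  obtain ⟨hv, hdot, _⟩ := pmFill_spec player control g r c v h
  exact ⟨hdot, hv ▸ hp⟩

lemma pmFill_local (player : String) (control : List (List String)) :
    ∀ g g' r c, pvCell g r c = pvCell g' r c →
      pmFill player control g r c = pmFill player control g' r c := by
  intro g g' r c h
  unfold pmFill
  rw [h]

-- ---------- the initial control grid ----------
lemma ccInit_shape (b : List (List String)) : pvShape (ccInit b) := by
  constructor
  · simp [ccInit, PySem.List.length_pyRange_one]
  · intro i hi
    have hlen : i < ((PySem.List.pyRange 0 4 1).map (fun r =>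
        (PySem.List.pyRange 0 4 1).map (fun c => pvCell b r c))).length := by
      simp [PySem.List.length_pyRange_one]; omega
    unfold ccInit
    rw [List.getD_eq_getElem _ _ hlen, List.getElem_map]
    simp [PySem.List.length_pyRange_one]

lemma ccInit_cell (b : List (List String)) (rc : Int × Int) (hrc : rc ∈ pvPairs) :
    pvCell (ccInit b) rc.1 rc.2 = pvCell b rc.1 rc.2 := by
  obtain ⟨h1, h2, h3, h4⟩ := pvPairs_bounds rc hrc
  unfold pvCell ccInit
  rw [PySem.List.pyGetD_map_pyRange_of_nonneg _ 4 _ _ h1 h2,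
    PySem.List.pyGetD_map_pyRange_of_nonneg _ 4 _ _ h3 h4]
  rfl


lemma pmLoop_succ (player : String) (fuel : Nat) (board control b' : List (List String)) (f : Bool)
    (h : pmPass player control board = (b', f)) :
    pmLoop player (fuel + 1) board control =
      if f then pmLoop player fuel b' (compute_control b') else b' := by
  rw [pmLoop.eq_2, h]

-- every fill of a stabilised 17-fuel loop is exhausted
lemma gLoop17_none (f : List (List String) → Int → Int → Option String) (hok : gFillOk f)
    (g : List (List String)) (hs : pvShape g) :
    ∀ rc ∈ pvPairs, f (gLoop f 17 g) rc.1 rc.2 = none := by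
  have hfix := gLoop_fix f hok 17 g hs (by have := countE_le g; omega)
  unfold gPass at hfix
  have hfalse : (List.foldl (gStep f) (gLoop f 17 g, false) pvPairs).2 = false := by
    rw [hfix]
  exact (gFold_false f pvPairs (gLoop f 17 g, false) hfalse).2

-- flood changes a square only from "." to player
lemma flood_cells (player : String) (_hp : player ≠ ".") (g : List (List String)) (hs : pvShape g) :
    ∀ rc ∈ pvPairs,
      pvCell (gLoop (flFill player) 17 g) rc.1 rc.2 = pvCell g rc.1 rc.2 ∨
      (pvCell g rc.1 rc.2 = "." ∧ pvCell (gLoop (flFill player) 17 g) rc.1 rc.2 = player) := by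
  refine (gLoop_inv (flFill player)
    (fun h => ∀ rc ∈ pvPairs, pvCell h rc.1 rc.2 = pvCell g rc.1 rc.2 ∨
      (pvCell g rc.1 rc.2 = "." ∧ pvCell h rc.1 rc.2 = player)) ?_ 17 g hs
      (fun rc _ => Or.inl rfl)).2
  intro h rc' v hrc' hsh hP hf
  obtain ⟨hv, hdot, _⟩ := flFill_spec player h rc'.1 rc'.2 v hf
  intro rc hrc
  obtain ⟨ha1, _, ha2, _⟩ := pvPairs_bounds rc' hrc'
  obtain ⟨h01, _, h02, _⟩ := pvPairs_bounds rc hrc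
  by_cases hee : (rc.1, rc.2) = (rc'.1, rc'.2)
  · have he1 : rc.1 = rc'.1 := congrArg Prod.fst hee
    have he2 : rc.2 = rc'.2 := congrArg Prod.snd hee
    obtain ⟨hb1, hb2⟩ := pvShape_bounds h rc' hsh hrc'
    rw [he1, he2, pvCell_pvSet_self _ _ _ _ ha1 ha2 hb1 hb2, hv]
    right
    refine ⟨?_, rfl⟩
    rcases hP rc' hrc' with hl | hr
    · rw [← hl]; exact hdot
    · exact hr.1
  · rw [pvCell_pvSet_ne _ _ _ _ _ _ h01 h02 ha1 ha2 hee]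
    exact hP rc hrc

-- flood result is closed: an empty square whose neighbours all ended up player was filled
lemma flood_closed (player : String) (hp : player ≠ ".") (g : List (List String)) (hs : pvShape g)
    (rc : Int × Int) (hrc : rc ∈ pvPairs)
    (hdot : pvCell g rc.1 rc.2 = ".")
    (hnb : ∀ p ∈ orth_neighbors rc.1 rc.2,
      pvCell (gLoop (flFill player) 17 g) p.1 p.2 = player) :
    pvCell (gLoop (flFill player) 17 g) rc.1 rc.2 = player := by
  have hnone := gLoop17_none (flFill player) (flFill_ok player hp) g hs rc hrc
  have hne : pvCell (gLoop (flFill player) 17 g) rc.1 rc.2 ≠ "." := by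
    intro h
    exact flFill_none player _ rc.1 rc.2 hnone ⟨h, hnb⟩
  rcases flood_cells player hp g hs rc hrc with hl | hr
  · exact absurd (hl.trans hdot) hne
  · exact hr.2

-- every control square is either the original value or justified by unanimous neighbours
lemma cc_J (b : List (List String)) :
    ∀ rc ∈ pvPairs,
      pvCell (gLoop ccFill 17 (ccInit b)) rc.1 rc.2 = pvCell (ccInit b) rc.1 rc.2 ∨
      (pvCell (gLoop ccFill 17 (ccInit b)) rc.1 rc.2 ≠ "." ∧
        ∀ p ∈ orth_neighbors rc.1 rc.2,
          pvCell (gLoop ccFill 17 (ccInit b)) p.1 p.2 =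
          pvCell (gLoop ccFill 17 (ccInit b)) rc.1 rc.2) := by
  refine (gLoop_inv ccFill
    (fun h => ∀ rc ∈ pvPairs, pvCell h rc.1 rc.2 = pvCell (ccInit b) rc.1 rc.2 ∨
      (pvCell h rc.1 rc.2 ≠ "." ∧ ∀ p ∈ orth_neighbors rc.1 rc.2,
        pvCell h p.1 p.2 = pvCell h rc.1 rc.2)) ?_ 17 (ccInit b) (ccInit_shape b)
      (fun rc _ => Or.inl rfl)).2
  intro h rc' v hrc' hsh hP hf
  obtain ⟨hdot, hvne, hnb⟩ := ccFill_spec h rc'.1 rc'.2 v hf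
  intro rc hrc
  obtain ⟨ha1, _, ha2, _⟩ := pvPairs_bounds rc' hrc'
  obtain ⟨h01, _, h02, _⟩ := pvPairs_bounds rc hrc
  obtain ⟨hb1, hb2⟩ := pvShape_bounds h rc' hsh hrc'
  have hself : pvCell (pvSet h rc'.1 rc'.2 v) rc'.1 rc'.2 = v :=
    pvCell_pvSet_self _ _ _ _ ha1 ha2 hb1 hb2
  by_cases hee : (rc.1, rc.2) = (rc'.1, rc'.2)
  · have he1 : rc.1 = rc'.1 := congrArg Prod.fst hee
    have he2 : rc.2 = rc'.2 := congrArg Prod.snd hee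
    right
    rw [he1, he2, hself]
    refine ⟨hvne, ?_⟩
    intro p hp
    obtain ⟨hp1, _, hp2, _⟩ := pvPairs_bounds p (orth_mem_pvPairs rc' hrc' p hp)
    have hpe : (p.1, p.2) ≠ (rc'.1, rc'.2) := by
      intro hq
      have hq1 : p.1 = rc'.1 := congrArg Prod.fst hq
      have hq2 : p.2 = rc'.2 := congrArg Prod.snd hq
      have := hnb p hp
      rw [hq1, hq2, hdot] at this
      exact hvne this.symm
    rw [pvCell_pvSet_ne _ _ _ _ _ _ hp1 hp2 ha1 ha2 hpe]
    exact hnb p hp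
  · rw [pvCell_pvSet_ne _ _ _ _ _ _ h01 h02 ha1 ha2 hee]
    rcases hP rc hrc with hl | ⟨hne, hjust⟩
    · exact Or.inl hl
    · right
      refine ⟨hne, ?_⟩
      intro p hp
      obtain ⟨hp1, _, hp2, _⟩ := pvPairs_bounds p (orth_mem_pvPairs rc hrc p hp)
      have hpe : (p.1, p.2) ≠ (rc'.1, rc'.2) := by
        intro hq
        have hq1 : p.1 = rc'.1 := congrArg Prod.fst hq
        have hq2 : p.2 = rc'.2 := congrArg Prod.snd hq
        have := hjust p hp
        rw [hq1, hq2, hdot] at this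
        exact hne this.symm
      rw [pvCell_pvSet_ne _ _ _ _ _ _ hp1 hp2 ha1 ha2 hpe]
      exact hjust p hp

-- a square is player-controlled in A's control table iff B's flood fill reaches it
lemma ccflC (player : String) (hp : player ≠ ".") (g : List (List String)) (hs : pvShape g)
    (rc : Int × Int) (hrc : rc ∈ pvPairs) :
    pvCell (gLoop ccFill 17 (ccInit g)) rc.1 rc.2 = player ↔
    pvCell (gLoop (flFill player) 17 g) rc.1 rc.2 = player := by
  constructor
  · -- control ⊆ flood: invariant along the control evolution
    have hinv := (gLoop_inv ccFill
      (fun h => ∀ rc ∈ pvPairs,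
        (pvCell h rc.1 rc.2 = "." → pvCell g rc.1 rc.2 = ".") ∧
        (pvCell h rc.1 rc.2 = player → pvCell (gLoop (flFill player) 17 g) rc.1 rc.2 = player))
      ?_ 17 (ccInit g) (ccInit_shape g) ?_).2
    · exact fun h => (hinv rc hrc).2 h
    · intro h rc' v hrc' hsh hP hf
      obtain ⟨hdot, hvne, hnb⟩ := ccFill_spec h rc'.1 rc'.2 v hf
      intro rc0 hrc0
      obtain ⟨ha1, _, ha2, _⟩ := pvPairs_bounds rc' hrc'
      obtain ⟨h01, _, h02, _⟩ := pvPairs_bounds rc0 hrc0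
      obtain ⟨hb1, hb2⟩ := pvShape_bounds h rc' hsh hrc'
      by_cases hee : (rc0.1, rc0.2) = (rc'.1, rc'.2)
      · have he1 : rc0.1 = rc'.1 := congrArg Prod.fst hee
        have he2 : rc0.2 = rc'.2 := congrArg Prod.snd hee
        rw [he1, he2, pvCell_pvSet_self _ _ _ _ ha1 ha2 hb1 hb2]
        constructor
        · intro hv; exact absurd hv hvne
        · intro hv
          refine flood_closed player hp g hs rc' hrc' ((hP rc' hrc').1 hdot) ?_
          intro p hpmem
          refine ((hP p (orth_mem_pvPairs rc' hrc' p hpmem)).2) ?_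
          rw [hnb p hpmem, hv]
      · rw [pvCell_pvSet_ne _ _ _ _ _ _ h01 h02 ha1 ha2 hee]
        exact hP rc0 hrc0
    · intro rc0 hrc0
      rw [ccInit_cell g rc0 hrc0]
      refine ⟨fun h => h, fun h => ?_⟩
      exact gLoop_persist (flFill player) (flFill_ok player hp) rc0 hrc0 player hp 17 g hs h
  · -- flood ⊆ control: invariant along the flood evolution
    have hinv := (gLoop_inv (flFill player)
      (fun h => ∀ rc ∈ pvPairs,
        (pvCell h rc.1 rc.2 = "." → pvCell g rc.1 rc.2 = ".") ∧
        (pvCell h rc.1 rc.2 = player → pvCell (gLoop ccFill 17 (ccInit g)) rc.1 rc.2 = player))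
      ?_ 17 g hs ?_).2
    · exact fun h => (hinv rc hrc).2 h
    · intro h rc' v hrc' hsh hP hf
      obtain ⟨hv, hdot, hnb⟩ := flFill_spec player h rc'.1 rc'.2 v hf
      intro rc0 hrc0
      obtain ⟨ha1, _, ha2, _⟩ := pvPairs_bounds rc' hrc'
      obtain ⟨h01, _, h02, _⟩ := pvPairs_bounds rc0 hrc0
      obtain ⟨hb1, hb2⟩ := pvShape_bounds h rc' hsh hrc'
      by_cases hee : (rc0.1, rc0.2) = (rc'.1, rc'.2)
      · have he1 : rc0.1 = rc'.1 := congrArg Prod.fst hee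
        have he2 : rc0.2 = rc'.2 := congrArg Prod.snd hee
        rw [he1, he2, pvCell_pvSet_self _ _ _ _ ha1 ha2 hb1 hb2, hv]
        constructor
        · intro hq; exact absurd hq hp
        · intro _
          -- the control table holds player at rc'
          have hgdot : pvCell g rc'.1 rc'.2 = "." := (hP rc' hrc').1 hdot
          have hHnb : ∀ p ∈ orth_neighbors rc'.1 rc'.2,
              pvCell (gLoop ccFill 17 (ccInit g)) p.1 p.2 = player := by
            intro p hpmem
            exact (hP p (orth_mem_pvPairs rc' hrc' p hpmem)).2 (hnb p hpmem)
          have hHnone := gLoop17_none ccFill ccFill_ok (ccInit g) (ccInit_shape g) rc' hrc'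
          have hHne : pvCell (gLoop ccFill 17 (ccInit g)) rc'.1 rc'.2 ≠ "." := by
            intro hq
            rw [ccFill_some_player _ rc' player hrc' hp hq hHnb] at hHnone
            exact absurd hHnone (by simp)
          rcases cc_J g rc' hrc' with hl | ⟨_, hjust⟩
          · rw [ccInit_cell g rc' hrc'] at hl
            exact absurd (hl.trans hgdot) hHne
          · cases horth : orth_neighbors rc'.1 rc'.2 with
            | nil => exact absurd horth (orth_ne_nil rc' hrc')
            | cons p0 ps =>
              have hp0 : p0 ∈ orth_neighbors rc'.1 rc'.2 := by rw [horth]; exact List.mem_cons_self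
              rw [← hjust p0 hp0]
              exact hHnb p0 hp0
      · rw [pvCell_pvSet_ne _ _ _ _ _ _ h01 h02 ha1 ha2 hee]
        exact hP rc0 hrc0
    · intro rc0 hrc0
      refine ⟨fun h => h, fun h => ?_⟩
      refine gLoop_persist ccFill ccFill_ok rc0 hrc0 player hp 17 (ccInit g) (ccInit_shape g) ?_
      rw [ccInit_cell g rc0 hrc0]
      exact h

-- ---------- grids agree with the base board outside the 4x4 region ----------
def pvAgree (b g : List (List String)) : Prop :=
  g.length = b.length ∧ (∀ i : Nat, (g.getD i []).length = (b.getD i []).length) ∧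
  ∀ i j : Nat, 4 ≤ i ∨ 4 ≤ j → (g.getD i []).getD j "" = (b.getD i []).getD j ""

lemma pvSet_entry_ne (g : List (List String)) (r c : Int) (v : String)
    (hr : 0 ≤ r) (hc : 0 ≤ c) (i j : Nat) (h : i ≠ r.toNat ∨ j ≠ c.toNat) :
    ((pvSet g r c v).getD i []).getD j "" = ((g.getD i []).getD j "") := by
  rw [pvSet_nonneg _ _ _ _ hr hc]
  rcases h with h | h
  · rw [getD_set_ne _ _ _ _ _ h]
  · by_cases hik : i = r.toNat
    · rw [hik]
      by_cases hlen : r.toNat < g.length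
      · rw [getD_set_self _ _ _ _ hlen, getD_set_ne _ _ _ _ _ h]
      · rw [List.set_eq_of_length_le (by omega)]
    · rw [getD_set_ne _ _ _ _ _ hik]

lemma pvAgree_set (b g : List (List String)) (rc : Int × Int) (v : String)
    (hrc : rc ∈ pvPairs) (h : pvAgree b g) : pvAgree b (pvSet g rc.1 rc.2 v) := by
  obtain ⟨h1, h2, h3, h4⟩ := pvPairs_bounds rc hrc
  obtain ⟨hl, hrowl, hout⟩ := h
  refine ⟨by rw [length_pvSet]; exact hl, fun i => by rw [rowlen_pvSet]; exact hrowl i, ?_⟩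
  intro i j hij
  rw [pvSet_entry_ne _ _ _ _ h1 h3 i j ?_]
  · exact hout i j hij
  · rcases hij with hi | hj
    · left; omega
    · right; omega

lemma pvAgree_gLoop (f : List (List String) → Int → Int → Option String)
    (b : List (List String)) (fuel : Nat) (g : List (List String))
    (hs : pvShape g) (h : pvAgree b g) : pvAgree b (gLoop f fuel g) :=
  (gLoop_inv f (pvAgree b) (fun g rc v hrc _ hP _ => pvAgree_set b g rc v hrc hP) fuel g hs h).2

lemma pvAgree_gPass (f : List (List String) → Int → Int → Option String)
    (b : List (List String)) (g : List (List String))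
    (hs : pvShape g) (h : pvAgree b g) : pvAgree b (gPass f g).1 :=
  (gFold_inv f (pvAgree b) (fun g rc v hrc _ hP _ => pvAgree_set b g rc v hrc hP)
    pvPairs (fun _ h => h) (g, false) hs h).2

lemma pvAgree_refl (b : List (List String)) : pvAgree b b :=
  ⟨rfl, fun _ => rfl, fun _ _ _ => rfl⟩

lemma pvAgree_ext (b g1 g2 : List (List String)) (h1 : pvAgree b g1) (h2 : pvAgree b g2)
    (hc : ∀ rc ∈ pvPairs, pvCell g1 rc.1 rc.2 = pvCell g2 rc.1 rc.2) : g1 = g2 := by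
  have hlen : g1.length = g2.length := h1.1.trans h2.1.symm
  apply List.ext_getElem hlen
  intro i hi1 hi2
  have hrow1 : g1[i] = g1.getD i [] := (List.getD_eq_getElem g1 [] hi1).symm
  have hrow2 : g2[i] = g2.getD i [] := (List.getD_eq_getElem g2 [] hi2).symm
  rw [hrow1, hrow2]
  have hrowlen : (g1.getD i []).length = (g2.getD i []).length :=
    (h1.2.1 i).trans (h2.2.1 i).symm
  apply List.ext_getElem hrowlen
  intro j hj1 hj2
  have he1 : (g1.getD i [])[j] = (g1.getD i []).getD j "" :=
    (List.getD_eq_getElem _ "" hj1).symm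
  have he2 : (g2.getD i [])[j] = (g2.getD i []).getD j "" :=
    (List.getD_eq_getElem _ "" hj2).symm
  rw [he1, he2]
  by_cases hij : i < 4 ∧ j < 4
  · have hmem := natpair_mem_pvPairs i j hij.1 hij.2
    have := hc ((i : Int), (j : Int)) hmem
    rw [pvCell_nonneg _ _ _ (by omega) (by omega), pvCell_nonneg _ _ _ (by omega) (by omega)] at this
    simpa using this
  · have hor : 4 ≤ i ∨ 4 ≤ j := by omega
    rw [h1.2.2 i j hor, h2.2.2 i j hor]

-- A's first fill pass (against the control table) produces exactly B's flood fixpoint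
lemma pass_eq_flood (player : String) (g : List (List String))
    (hp : player ≠ ".") (hs : pvShape g) :
    (gPass (pmFill player (gLoop ccFill 17 (ccInit g))) g).1 = gLoop (flFill player) 17 g := by
  refine pvAgree_ext g _ _
    (pvAgree_gPass _ g g hs (pvAgree_refl g))
    (pvAgree_gLoop _ g 17 g hs (pvAgree_refl g)) ?_
  intro rc hrc
  rw [gPass_local (pmFill player (gLoop ccFill 17 (ccInit g)))
    (pmFill_local player _) g hs rc hrc]
  by_cases hdot : pvCell g rc.1 rc.2 = "."
  · by_cases hH : pvCell (gLoop ccFill 17 (ccInit g)) rc.1 rc.2 = player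
    · have hf : pmFill player (gLoop ccFill 17 (ccInit g)) g rc.1 rc.2 = some player := by
        unfold pmFill; rw [if_pos ⟨hdot, hH⟩]
      rw [hf]
      exact ((ccflC player hp g hs rc hrc).mp hH).symm
    · have hf : pmFill player (gLoop ccFill 17 (ccInit g)) g rc.1 rc.2 = none := by
        unfold pmFill; rw [if_neg (fun hq => hH hq.2)]
      rw [hf]
      rcases flood_cells player hp g hs rc hrc with hl | hr
      · exact hl.symm
      · exact absurd ((ccflC player hp g hs rc hrc).mpr hr.2) hH
  · have hf : pmFill player (gLoop ccFill 17 (ccInit g)) g rc.1 rc.2 = none := by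
      unfold pmFill; rw [if_neg (fun hq => hdot hq.1)]
    rw [hf]
    rcases flood_cells player hp g hs rc hrc with hl | hr
    · exact hl.symm
    · exact absurd hr.1 hdot

-- the central equivalence on a placed board
lemma central (player : String) (b : List (List String))
    (hp : player ≠ ".") (hs : pvShape b) :
    pmLoop player 17 b (compute_control b) = flLoop player 17 b := by
  rw [flLoop_eq, compute_control_eq]
  have hb1 := pass_eq_flood player b hp hs
  have hFS : pvShape (gLoop (flFill player) 17 b) := gLoop_shape _ 17 b hs
  have hFfix := gLoop17_none (flFill player) (flFill_ok player hp) b hs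
  have hFF : gLoop (flFill player) 17 (gLoop (flFill player) 17 b) = gLoop (flFill player) 17 b :=
    gLoop_of_none _ 16 _ hFfix
  have hfix2 : gPass (pmFill player (compute_control (gLoop (flFill player) 17 b)))
      (gLoop (flFill player) 17 b) = (gLoop (flFill player) 17 b, false) := by
    unfold gPass
    apply gFold_none
    intro rc hrc
    unfold pmFill
    rw [if_neg]
    rintro ⟨h1, h2⟩
    rw [compute_control_eq] at h2
    have := (ccflC player hp _ hFS rc hrc).mp h2
    rw [hFF] at this
    exact hp (this.symm.trans h1)
  cases hpass : gPass (pmFill player (gLoop ccFill 17 (ccInit b))) b with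
  | mk b1 s =>
    have hpm1 : pmPass player (gLoop ccFill 17 (ccInit b)) b = (b1, s) := by
      rw [pmPass_eq]; exact hpass
    have hb1F : b1 = gLoop (flFill player) 17 b := by rw [← hb1, hpass]
    show pmLoop player (16 + 1) b (gLoop ccFill 17 (ccInit b)) = _
    rw [pmLoop_succ player 16 b _ b1 s hpm1]
    cases s with
    | false => simpa using hb1F
    | true =>
      simp only [if_true]
      rw [hb1F]
      have hpm2 : pmPass player (compute_control (gLoop (flFill player) 17 b))
          (gLoop (flFill player) 17 b) = (gLoop (flFill player) 17 b, false) := by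
        rw [pmPass_eq]; exact hfix2
      show pmLoop player (15 + 1) _ _ = _
      rw [pmLoop_succ player 15 _ _ _ false hpm2]
      simp

theorem player_move_spec : Claim_equal_player_move := by
  intro board player r c _ hpre
  obtain ⟨h4, hrow, _, _, hp⟩ := hpre
  unfold Spec_player_move player_move player_move_alt
  simp only [List.map_id']
  rw [if_pos hp]
  exact central player (pvSet board r c player) hp (pvShape_pvSet board r c player ⟨h4, hrow⟩)
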